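-- pv_equiv track=rewrite | github.com/ma7moudShaaban/R00tKeep3r | src/modules/enumeration.py | _sort_findings
-- ===== SOURCE A (Python) =====
-- def _sort_findings(findings):
--     """Sort findings by priority: sudo > suid > cron > kernel . Processes"""
--     priority_order = [
--         "SudoPermissions",  # Highest priority
--         "SUID",
--         "CronJobs",
--         "Kernel",
--         "Processes"            # Includes version + exploits
--     ]
--
--     sorted_data = {}
--     # Add priority keys first
--     for key in priority_order:
--         if key in findings:
--             sorted_data[key] = findings[key]
--
--     # Add non-priority keys (OS, Writable, etc.)
--     for key in findings:
--         if key not in priority_order: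
--             sorted_data[key] = findings[key]
--
--     return sorted_data
-- ===== SOURCE B (Python) =====
-- def _sort_findings(findings):
--     """Sort findings by priority via one stable sort keyed by priority rank."""
--     priority_order = [
--         "SudoPermissions",
--         "SUID",
--         "CronJobs",
--         "Kernel",
--         "Processes"
--     ]
--     return dict(sorted(
--         findings.items(),
--         key=lambda kv: priority_order.index(kv[0]) if kv[0] in priority_order else len(priority_order)
--     ))
-- ===== Notes on version B (the rewrite author's own statement) =====
-- stated objective: idiomatic
-- what changed: A's two explicit partition loops (priority keys first, then the remaining keys) are replaced by one stable sort of findings.items() keyed by each key's index in priority_order (len(priority_order) for non-priority keys), relying on sort stability to keep non-priority keys in original order.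
import Mathlib
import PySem

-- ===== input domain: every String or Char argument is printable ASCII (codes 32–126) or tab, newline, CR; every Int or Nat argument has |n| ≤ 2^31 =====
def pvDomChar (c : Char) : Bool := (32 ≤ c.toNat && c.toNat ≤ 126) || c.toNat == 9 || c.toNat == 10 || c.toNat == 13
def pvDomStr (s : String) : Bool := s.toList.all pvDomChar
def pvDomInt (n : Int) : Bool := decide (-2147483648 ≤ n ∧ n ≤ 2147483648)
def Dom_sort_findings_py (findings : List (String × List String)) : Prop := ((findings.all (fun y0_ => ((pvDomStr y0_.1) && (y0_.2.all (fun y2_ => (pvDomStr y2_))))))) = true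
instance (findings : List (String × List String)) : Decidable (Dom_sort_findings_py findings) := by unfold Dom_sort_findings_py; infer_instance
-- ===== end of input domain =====

-- B replaces A's two partition loops by one stable sort keyed by priority rank (idiomatic; same observable result).

-- the module-level priority list, shared verbatim by both Pythons
def pvPriorityOrder : List String :=
  ["SudoPermissions", "SUID", "CronJobs", "Kernel", "Processes"]

-- ===== PORT A =====
-- `findings` (a Python dict) is its item list; `key in findings` / `findings[key]` go through PySem.Dict.
def sort_findings_py (findings : List (String × List String)) : List (String × List String) :=
  let fd : PySem.Dict String (List String) := PySem.Dict.mk findings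
  -- sorted_data = {}; for key in priority_order: if key in findings: sorted_data[key] = findings[key]
  let d1 := pvPriorityOrder.foldl
    (fun d key => if fd.contains key then d.insert key (fd.getD key []) else d) PySem.Dict.empty
  -- for key in findings: if key not in priority_order: sorted_data[key] = findings[key]
  let d2 := fd.keys.foldl
    (fun d key => if pvPriorityOrder.contains key then d else d.insert key (fd.getD key [])) d1
  d2.items

-- ===== PORT B =====
-- key=lambda kv: priority_order.index(kv[0]) if kv[0] in priority_order else len(priority_order)
def pvRankKey (kv : String × List String) : Int :=
  match PySem.List.index? pvPriorityOrder kv.1 with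
  | some i => (i : Int)
  | none => PySem.List.len pvPriorityOrder

-- return dict(sorted(findings.items(), key=...))
def sort_findings_py_alt (findings : List (String × List String)) : List (String × List String) :=
  (PySem.Dict.ofList (PySem.List.sorted findings pvRankKey false)).items

-- ===== PRECONDITION & SPEC =====
-- The argument models a Python dict, whose keys are necessarily distinct: association lists with a
-- repeated first component do not correspond to any Python input, so they are excluded.
def Pre_sort_findings_py (findings : List (String × List String)) : Prop :=
  (findings.map Prod.fst).Nodup
instance (findings : List (String × List String)) : Decidable (Pre_sort_findings_py findings) := by
  unfold Pre_sort_findings_py; infer_instance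

def pvWitness_sort_findings_py : (List (String × List String)) :=
  [("OS", ["linux"]), ("SUID", ["/usr/bin/passwd"])]

def Spec_sort_findings_py (findings : List (String × List String)) (out : List (String × List String)) : Prop := out = sort_findings_py_alt findings
instance (findings : List (String × List String)) (out : List (String × List String)) : Decidable (Spec_sort_findings_py findings out) := by unfold Spec_sort_findings_py; infer_instance

-- ===== CLAIM (what is proved, stated in full; the proofs are below) =====
def Claim_equal_sort_findings_py : Prop := ∀ (findings : List (String × List String)), Dom_sort_findings_py findings → Pre_sort_findings_py findings → Spec_sort_findings_py findings (sort_findings_py findings)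

-- ===== LEMMAS AND PROOFS =====

-- insertBy passes over a prefix it does not go before
theorem pv_insertBy_append {α : Type} (before : α → α → Bool) (x : α) (pre l : List α)
    (h : ∀ y ∈ pre, before x y = false) :
    PySem.List.insertBy before x (pre ++ l) = pre ++ PySem.List.insertBy before x l := by
  induction pre with
  | nil => rfl
  | cons z zs ih =>
    simp only [List.cons_append, PySem.List.insertBy, h z (by simp)]
    simp only [Bool.false_eq_true, if_false, List.cons.injEq, true_and]
    exact ih (fun y hy => h y (by simp [hy]))

-- insertBy lands exactly between a not-before prefix and an all-before suffix
theorem pv_insertBy_between {α : Type} (before : α → α → Bool) (x : α) (pre l : List α)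
    (h1 : ∀ y ∈ pre, before x y = false) (h2 : ∀ y ∈ l, before x y = true) :
    PySem.List.insertBy before x (pre ++ l) = pre ++ x :: l := by
  rw [pv_insertBy_append before x pre l h1]
  cases l with
  | nil => rfl
  | cons z zs => simp [PySem.List.insertBy, h2 z (by simp)]

-- stable insertion of one element into a class-decomposed list
theorem pv_insertBy_flatMap {α : Type} (key : α → Int) (x : α) (vals : List Int) (F : Int → List α)
    (hF : ∀ v ∈ vals, ∀ y ∈ F v, key y = v) (hv : vals.Pairwise (· < ·)) (hx : key x ∈ vals) :
    PySem.List.insertBy (fun a b => decide (key a < key b)) x (vals.flatMap F) =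
      vals.flatMap (fun v => F v ++ if key x = v then [x] else []) := by
  induction vals with
  | nil => simp at hx
  | cons v vs ih =>
    have hvlt : ∀ w ∈ vs, v < w := (List.pairwise_cons.mp hv).1
    by_cases hxv : key x = v
    · have hrest : ∀ y ∈ vs.flatMap F, (fun a b => decide (key a < key b)) x y = true := by
        intro y hy
        obtain ⟨w, hw, hyw⟩ := List.mem_flatMap.mp hy
        have := hF w (by simp [hw]) y hyw
        simp [this, hxv]
        exact hvlt w hw
      have hpre : ∀ y ∈ F v, (fun a b => decide (key a < key b)) x y = false := by
        intro y hy
        have := hF v (by simp) y hy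
        simp [this, hxv]
      have := pv_insertBy_between (fun a b => decide (key a < key b)) x (F v) (vs.flatMap F) hpre hrest
      simp only [List.flatMap_cons] at this ⊢
      rw [this, if_pos hxv]
      have : vs.flatMap (fun w => F w ++ if key x = w then [x] else []) = vs.flatMap F := by
        apply List.flatMap_congr
        intro w hw
        have : key x ≠ w := by have := hvlt w hw; omega
        simp [this]
      rw [this]; simp
    · have hxvs : key x ∈ vs := by
        rcases List.mem_cons.mp hx with h | h
        · exact absurd h hxv
        · exact h
      have hvltx : v < key x := hvlt _ hxvs
      have hpre : ∀ y ∈ F v, (fun a b => decide (key a < key b)) x y = false := by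
        intro y hy
        have := hF v (by simp) y hy
        simp [this]; omega
      simp only [List.flatMap_cons]
      rw [pv_insertBy_append _ x (F v) _ hpre,
        ih (fun w hw y hy => hF w (by simp [hw]) y hy) (List.pairwise_cons.mp hv).2 hxvs,
        if_neg hxv]
      simp

-- the stable sort is the concatenation of the key classes, in key order
theorem pv_sorted_classes {α : Type} (key : α → Int) (xs : List α) (vals : List Int)
    (hv : vals.Pairwise (· < ·)) (hall : ∀ x ∈ xs, key x ∈ vals) :
    PySem.List.sorted xs key false =
      vals.flatMap (fun v => xs.filter (fun y => key y = v)) := by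
  induction xs using List.reverseRecOn with
  | nil => simp [PySem.List.sorted]
  | append_singleton ys x ih =>
    rw [PySem.List.sorted_eq_foldl_insertBy, List.foldl_append, List.foldl_cons, List.foldl_nil,
      ← PySem.List.sorted_eq_foldl_insertBy,
      ih (fun y hy => hall y (by simp [hy])),
      pv_insertBy_flatMap key x vals _ ?_ hv (hall x (by simp))]
    · apply List.flatMap_congr
      intro v _
      simp only [List.filter_append, List.filter_cons, List.filter_nil]
      by_cases h : key x = v <;> simp [h]
    · intro v _ y hy
      simpa using (List.mem_filter.mp hy).2

-- pvRankKey as an explicit case split on the key string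
theorem pv_rank_spec (y : String × List String) :
    pvRankKey y =
      (if y.1 = "SudoPermissions" then 0 else if y.1 = "SUID" then 1 else
       if y.1 = "CronJobs" then 2 else if y.1 = "Kernel" then 3 else
       if y.1 = "Processes" then 4 else 5) := by
  unfold pvRankKey pvPriorityOrder
  rcases y with ⟨s, v⟩
  by_cases h1 : s = "SudoPermissions" <;> by_cases h2 : s = "SUID" <;>
    by_cases h3 : s = "CronJobs" <;> by_cases h4 : s = "Kernel" <;>
    by_cases h5 : s = "Processes" <;>
  simp_all [PySem.List.index?, List.idxOf?, List.findIdx?_cons, PySem.List.len]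
  simp [if_neg (Ne.symm h1), if_neg (Ne.symm h2), if_neg (Ne.symm h3),
    if_neg (Ne.symm h4), if_neg (Ne.symm h5)]

-- first-match lookup vs filter-by-key on a list with distinct keys
theorem pv_filter_fst_eq {ν : Type} (l : List (String × ν)) (n : String)
    (h : (l.map Prod.fst).Nodup) :
    l.filter (fun y => y.1 = n) =
      (match (PySem.Dict.mk l).get? n with
       | some v => [(n, v)]
       | none => ([] : List (String × ν))) := by
  induction l with
  | nil => simp [PySem.Dict.get?]
  | cons p t ih =>
    rcases p with ⟨k, v⟩
    simp only [List.map_cons, List.nodup_cons] at h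
    rw [PySem.Dict.get?_mk_cons]
    by_cases hk : k = n
    · subst hk
      simp only [beq_self_eq_true, if_true]
      have : t.filter (fun y => y.1 = k) = [] := by
        apply List.filter_eq_nil_iff.mpr
        intro y hy hyk
        have h1 : y.1 = k := of_decide_eq_true hyk
        have h2 : y.1 ∈ t.map Prod.fst := List.mem_map_of_mem hy
        exact h.1 (h1 ▸ h2)
      simp [this]
    · have hbeq : (k == n) = false := by simpa using hk
      rw [hbeq, if_neg (by simp)]
      rw [← ih h.2]
      simp [hk]

-- port A, normalised to its two partition chunks
theorem pv_portA_eq (findings : List (String × List String))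
    (hpre : (findings.map Prod.fst).Nodup) :
    sort_findings_py findings =
      ((pvPriorityOrder.filter (fun k => (PySem.Dict.mk findings).contains k)).map
          (fun k => (k, (PySem.Dict.mk findings).getD k []))) ++
      (((findings.map Prod.fst).filter (fun k => !pvPriorityOrder.contains k)).map
          (fun k => (k, (PySem.Dict.mk findings).getD k []))) := by
  unfold sort_findings_py
  simp only []
  set fd : PySem.Dict String (List String) := PySem.Dict.mk findings with hfd
  have hk : fd.keys = findings.map Prod.fst := by
    rw [hfd]; simp [PySem.Dict.keys_mk]
  rw [PySem.List.foldl_if_eq_foldl_filter (fun k => fd.contains k)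
      (fun d k => d.insert k (fd.getD k [])) pvPriorityOrder PySem.Dict.empty]
  rw [PySem.List.foldl_congr_mem _ _
      (fun d key => if (!pvPriorityOrder.contains key) = true then d.insert key (fd.getD key []) else d) _
      (by intro acc x _; by_cases hx : pvPriorityOrder.contains x = true <;> simp [hx])]
  rw [PySem.List.foldl_if_eq_foldl_filter (fun k => !pvPriorityOrder.contains k)
      (fun (d : PySem.Dict String (List String)) k => d.insert k (fd.getD k [])) fd.keys
      (List.foldl (fun d k => d.insert k (fd.getD k [])) PySem.Dict.empty
        (List.filter (fun k => fd.contains k) pvPriorityOrder))]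
  have hP : (pvPriorityOrder.filter (fun k => fd.contains k)).Nodup :=
    List.Nodup.filter _ (by decide)
  have hd1 : (List.foldl (fun d k => d.insert k (fd.getD k []))
      PySem.Dict.empty (pvPriorityOrder.filter (fun k => fd.contains k))).items =
      (pvPriorityOrder.filter (fun k => fd.contains k)).map (fun k => (k, fd.getD k [])) := by
    rw [PySem.Dict.items_foldl_insert_fresh _ (fun a => a) (fun a => fd.getD a [])
        PySem.Dict.empty (by intro a _; rfl) (by simpa using hP)]
    rfl
  rw [PySem.Dict.items_foldl_insert_fresh _ (fun a => a) (fun a => fd.getD a []) _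
      ?fresh (by rw [hk]; simpa using List.Nodup.filter _ hpre)]
  · rw [hd1, hk]
  case fresh =>
    intro a ha
    have hmem := List.mem_filter.mp ha
    have hnot : pvPriorityOrder.contains a = false := by simp at hmem; simp [hmem.2]
    rw [PySem.Dict.contains_eq_decide_mem_keys]
    simp only [decide_eq_false_iff_not]
    intro hak
    have hkeys1 : (List.foldl (fun d k => d.insert k (fd.getD k []))
        PySem.Dict.empty (pvPriorityOrder.filter (fun k => fd.contains k))).keys
        = pvPriorityOrder.filter (fun k => fd.contains k) := by
      simp only [PySem.Dict.keys, hd1, List.map_map]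
      exact (List.map_congr_left fun b _ => rfl).trans (List.map_id _)
    rw [hkeys1] at hak
    have : a ∈ pvPriorityOrder := List.mem_of_mem_filter hak
    simp [this] at hnot

-- port B, normalised: dict() of a distinct-key item list is that list
theorem pv_portB_eq (findings : List (String × List String))
    (hpre : (findings.map Prod.fst).Nodup) :
    sort_findings_py_alt findings = PySem.List.sorted findings pvRankKey false := by
  unfold sort_findings_py_alt
  have hperm : (PySem.List.sorted findings pvRankKey false).Perm findings :=
    PySem.List.sorted_perm findings pvRankKey false
  have hnod : ((PySem.List.sorted findings pvRankKey false).map Prod.fst).Nodup :=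
    ((hperm.map Prod.fst).nodup_iff).mpr hpre
  rw [PySem.Dict.ofList, PySem.Dict.update,
    PySem.Dict.items_foldl_insert_fresh _ Prod.fst Prod.snd PySem.Dict.empty
      (by intro a _; rfl) hnod]
  simp [PySem.Dict.empty]

-- the two normal forms coincide
theorem pv_bridge (findings : List (String × List String))
    (hpre : (findings.map Prod.fst).Nodup) :
    ((pvPriorityOrder.filter (fun k => (PySem.Dict.mk findings).contains k)).map
        (fun k => (k, (PySem.Dict.mk findings).getD k []))) ++
    (((findings.map Prod.fst).filter (fun k => !pvPriorityOrder.contains k)).map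
        (fun k => (k, (PySem.Dict.mk findings).getD k []))) =
    PySem.List.sorted findings pvRankKey false := by
  set fd : PySem.Dict String (List String) := PySem.Dict.mk findings with hfd
  have hfd_items : fd.items = findings := rfl
  have hkN : fd.keys.Nodup := by
    rw [hfd]; simpa [PySem.Dict.keys_mk] using hpre
  -- B side: stable sort = concatenation of the six rank classes
  rw [pv_sorted_classes pvRankKey findings [0, 1, 2, 3, 4, 5] (by decide)
      (by intro x _; rw [pv_rank_spec x]; split_ifs <;> decide)]
  simp only [List.flatMap_cons, List.flatMap_nil, List.append_nil]
  -- each priority class filters by one key string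
  have e0 : findings.filter (fun y => pvRankKey y = 0) =
      findings.filter (fun y => y.1 = "SudoPermissions") := by
    apply List.filter_congr; intro y _; rw [pv_rank_spec y]; split_ifs <;> simp_all
  have e1 : findings.filter (fun y => pvRankKey y = 1) =
      findings.filter (fun y => y.1 = "SUID") := by
    apply List.filter_congr; intro y _; rw [pv_rank_spec y]; split_ifs <;> simp_all
  have e2 : findings.filter (fun y => pvRankKey y = 2) =
      findings.filter (fun y => y.1 = "CronJobs") := by
    apply List.filter_congr; intro y _; rw [pv_rank_spec y]; split_ifs <;> simp_all
  have e3 : findings.filter (fun y => pvRankKey y = 3) =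
      findings.filter (fun y => y.1 = "Kernel") := by
    apply List.filter_congr; intro y _; rw [pv_rank_spec y]; split_ifs <;> simp_all
  have e4 : findings.filter (fun y => pvRankKey y = 4) =
      findings.filter (fun y => y.1 = "Processes") := by
    apply List.filter_congr; intro y _; rw [pv_rank_spec y]; split_ifs <;> simp_all
  have e5 : findings.filter (fun y => pvRankKey y = 5) =
      findings.filter (fun y => !pvPriorityOrder.contains y.1) := by
    apply List.filter_congr; intro y _; rw [pv_rank_spec y]
    split_ifs <;> simp_all [pvPriorityOrder]
  rw [e0, e1, e2, e3, e4, e5,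
    pv_filter_fst_eq findings "SudoPermissions" hpre,
    pv_filter_fst_eq findings "SUID" hpre,
    pv_filter_fst_eq findings "CronJobs" hpre,
    pv_filter_fst_eq findings "Kernel" hpre,
    pv_filter_fst_eq findings "Processes" hpre]
  -- A side, non-priority chunk: the map back to pairs is the identity
  have hQ : (((findings.map Prod.fst).filter (fun k => !pvPriorityOrder.contains k)).map
      (fun k => (k, fd.getD k []))) =
      findings.filter (fun y => !pvPriorityOrder.contains y.1) := by
    rw [List.filter_map, List.map_map]
    have : ∀ y ∈ findings.filter ((fun k => !pvPriorityOrder.contains k) ∘ Prod.fst),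
        ((fun k => (k, fd.getD k [])) ∘ Prod.fst) y = y := by
      intro y hy
      have hmem := List.mem_of_mem_filter hy
      have hget : fd.getD y.1 [] = y.2 :=
        PySem.Dict.getD_of_mem_items fd (by simpa [hfd_items] using hmem) hkN []
      simp [Function.comp, hget]
    rw [List.map_congr_left this, List.map_id']
    apply List.filter_congr; intro y _; simp [Function.comp]
  rw [hQ]
  -- case on presence of each priority key; everything reduces
  rcases hg0 : fd.get? "SudoPermissions" with _ | v0 <;>
  rcases hg1 : fd.get? "SUID" with _ | v1 <;>
  rcases hg2 : fd.get? "CronJobs" with _ | v2 <;>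
  rcases hg3 : fd.get? "Kernel" with _ | v3 <;>
  rcases hg4 : fd.get? "Processes" with _ | v4 <;>
  simp [pvPriorityOrder, List.filter_nil,
    PySem.Dict.contains_eq_isSome_get?, PySem.Dict.getD_eq_get?_getD,
    hg0, hg1, hg2, hg3, hg4]

-- ===== VERDICT (by name: the statement is the Claim_ definition above) =====
theorem sort_findings_py_spec : Claim_equal_sort_findings_py := by
  intro findings _ hpre
  unfold Pre_sort_findings_py at hpre
  unfold Spec_sort_findings_py
  rw [pv_portA_eq findings hpre, pv_portB_eq findings hpre, pv_bridge findings hpre]
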